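-- pv_equiv track=rewrite | github.com/lolcat-max/res_dist | res_dist.py | _solve_subset_sum_exact
-- ===== SOURCE A (Python) =====
-- def _solve_subset_sum_exact(numbers, target):
--     if target == 0:
--         return []
--     n = len(numbers)
--     if n == 0 or target < 0:
--         return None
--     if target > 100000:
--         return None
--     dp = [False] * (target + 1)
--     dp[0] = True
--     prev = [-1] * (target + 1)
--     for num in numbers:
--         if num > target:
--             continue
--         for s in range(target, num - 1, -1):
--             if not dp[s] and dp[s - num]:
--                 dp[s] = True
--                 prev[s] = s - num
--     if not dp[target]:
--         return None
--     subset = []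
--     s = target
--     while s > 0:
--         prev_s = prev[s]
--         if prev_s == -1:
--             break
--         num = s - prev_s
--         subset.append(num)
--         s = prev_s
--     return subset
-- ===== SOURCE B (Python) =====
-- def _solve_subset_sum_exact(numbers, target):
--     if target == 0:
--         return []
--     if len(numbers) == 0 or target < 0:
--         return None
--     if target > 100000:
--         return None
--     # forward dict DP: reachable sum -> chosen subset (first-found kept)
--     reach = {0: []}
--     for num in numbers:
--         if num > target:
--             continue
--         updates = {}
--         for s, sub in reach.items():
--             t = s + num
--             if t <= target and t not in reach:
--                 updates[t] = [num] + sub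
--         reach.update(updates)
--     return reach.get(target)
-- ===== Notes on version B (the rewrite author's own statement) =====
-- stated objective: alternative
-- what changed: Replaced the boolean dp array with prev-backpointers plus a separate backward reconstruction walk by a single forward dictionary DP that maps each reachable sum directly to its chosen subset, so no backpointer array and no reconstruction pass exist. (Pre_ excludes the inputs where A raises IndexError: a negative element with 1 <= target <= 100000.)
import Mathlib
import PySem

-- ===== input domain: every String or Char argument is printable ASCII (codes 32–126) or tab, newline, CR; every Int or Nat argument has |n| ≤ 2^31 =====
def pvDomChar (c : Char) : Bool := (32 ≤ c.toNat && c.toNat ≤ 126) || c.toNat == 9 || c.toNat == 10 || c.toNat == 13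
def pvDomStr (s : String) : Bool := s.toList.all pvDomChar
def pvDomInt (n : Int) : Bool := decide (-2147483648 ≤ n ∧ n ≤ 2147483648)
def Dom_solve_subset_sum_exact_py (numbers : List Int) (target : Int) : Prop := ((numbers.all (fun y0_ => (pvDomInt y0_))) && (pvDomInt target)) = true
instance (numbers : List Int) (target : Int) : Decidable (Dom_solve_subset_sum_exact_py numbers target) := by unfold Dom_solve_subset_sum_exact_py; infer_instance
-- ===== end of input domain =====

-- B replaces A's boolean-dp + backpointer arrays + backward reconstruction by one forward
-- dictionary DP carrying the chosen subset per reachable sum (objective: alternative; the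
-- equivalence below is about return values on Pre_, where A does not raise).

-- ===== PORT A =====
-- Python-list indexing/assignment on Array state (O(1), as in Python); exact for the
-- nonnegative in-range indices this algorithm uses on inputs admitted by Pre_.
def aget {α : Type} (a : Array α) (i : Int) (d : α) : α := (a[i.toNat]?).getD d
def aset {α : Type} (a : Array α) (i : Int) (v : α) : Array α := a.setIfInBounds i.toNat v

-- inner loop body: 'if not dp[s] and dp[s - num]: dp[s] = True; prev[s] = s - num'
def stepA (num : Int) (st : Array Bool × Array Int) (s : Int) : Array Bool × Array Int :=
  if aget st.1 s false = false ∧ aget st.1 (s - num) false = true then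
    (aset st.1 s true, aset st.2 s (s - num))
  else st

-- body of 'for num in numbers'
def passA (target : Int) (st : Array Bool × Array Int) (num : Int) : Array Bool × Array Int :=
  if num > target then st
  else (PySem.List.pyRange target (num - 1) (-1)).foldl (stepA num) st

-- the 'while s > 0' reconstruction walk (fuel bounds the steps; each step strictly decreases s)
def reconA (prev : Array Int) : Nat → Int → List Int → List Int
  | 0, _, acc => acc
  | fuel + 1, s, acc =>
    if 0 < s then
      let prev_s := aget prev s 0
      if prev_s = -1 then acc
      else reconA prev fuel prev_s (acc ++ [s - prev_s])
    else acc

def solve_subset_sum_exact_py (numbers : List Int) (target : Int) : Option (List Int) :=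
  if target = 0 then some [] else
  if numbers.length = 0 ∨ target < 0 then none else
  if target > 100000 then none else
  let dp0 : Array Bool := aset (Array.replicate (target + 1).toNat false) 0 true
  let prev0 : Array Int := Array.replicate (target + 1).toNat (-1)
  let st := numbers.foldl (passA target) (dp0, prev0)
  if aget st.1 target false = false then none
  else some (reconA st.2 (target + 1).toNat target [])

-- ===== PORT B =====
-- 'if t <= target and t not in reach: updates[t] = [num] + sub'
def updB (target num : Int) (reach : PySem.Dict Int (List Int))
    (u : PySem.Dict Int (List Int)) (p : Int × List Int) : PySem.Dict Int (List Int) :=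
  let t := p.1 + num
  if t ≤ target ∧ reach.contains t = false then u.insert t (num :: p.2) else u

-- body of 'for num in numbers': build updates over reach.items, then reach.update(updates)
def passB (target : Int) (reach : PySem.Dict Int (List Int)) (num : Int) : PySem.Dict Int (List Int) :=
  if num > target then reach
  else
    let updates := reach.items.foldl (updB target num reach) PySem.Dict.empty
    updates.items.foldl (fun r p => r.insert p.1 p.2) reach

def solve_subset_sum_exact_py_alt (numbers : List Int) (target : Int) : Option (List Int) :=
  if target = 0 then some [] else
  if numbers.length = 0 ∨ target < 0 then none else
  if target > 100000 then none else
  (numbers.foldl (passB target) (PySem.Dict.empty.insert 0 [])).get? target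

-- ===== PRECONDITION & SPEC =====
-- Pre_ excludes exactly the inputs on which A raises IndexError: a negative element reached
-- while 1 ≤ target ≤ 100000 makes A read dp[s - num] past the end of the array.
def Pre_solve_subset_sum_exact_py (numbers : List Int) (target : Int) : Prop :=
  target ≤ 0 ∨ 100000 < target ∨ numbers = [] ∨ ∀ num ∈ numbers, 0 ≤ num
instance (numbers : List Int) (target : Int) : Decidable (Pre_solve_subset_sum_exact_py numbers target) := by unfold Pre_solve_subset_sum_exact_py; infer_instance

def pvWitness_solve_subset_sum_exact_py : List Int × Int := ([2, 3, 5], 8)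

def Spec_solve_subset_sum_exact_py (numbers : List Int) (target : Int) (out : Option (List Int)) : Prop := out = solve_subset_sum_exact_py_alt numbers target
instance (numbers : List Int) (target : Int) (out : Option (List Int)) : Decidable (Spec_solve_subset_sum_exact_py numbers target out) := by unfold Spec_solve_subset_sum_exact_py; infer_instance

-- ===== CLAIM (what is proved, stated in full; the proofs are below) =====
def Claim_equal_solve_subset_sum_exact_py : Prop := ∀ (numbers : List Int) (target : Int), Dom_solve_subset_sum_exact_py numbers target → Pre_solve_subset_sum_exact_py numbers target → Spec_solve_subset_sum_exact_py numbers target (solve_subset_sum_exact_py numbers target)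

-- ===== LEMMAS AND PROOFS =====

-- list-level twins of the array state operations (the invariant proofs live on lists)
def lget {α : Type} (xs : List α) (i : Int) (d : α) : α := (xs[i.toNat]?).getD d
def lset {α : Type} (xs : List α) (i : Int) (v : α) : List α := xs.set i.toNat v

def stepL (num : Int) (st : List Bool × List Int) (s : Int) : List Bool × List Int :=
  if lget st.1 s false = false ∧ lget st.1 (s - num) false = true then
    (lset st.1 s true, lset st.2 s (s - num))
  else st

def passL (target : Int) (st : List Bool × List Int) (num : Int) : List Bool × List Int :=
  if num > target then st
  else (PySem.List.pyRange target (num - 1) (-1)).foldl (stepL num) st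

def reconL (prev : List Int) : Nat → Int → List Int → List Int
  | 0, _, acc => acc
  | fuel + 1, s, acc =>
    if 0 < s then
      let prev_s := lget prev s 0
      if prev_s = -1 then acc
      else reconL prev fuel prev_s (acc ++ [s - prev_s])
    else acc

lemma lset_length {α : Type} (xs : List α) (i : Int) (v : α) : (lset xs i v).length = xs.length :=
  List.length_set

lemma aget_eq {α : Type} (a : Array α) (i : Int) (d : α) : aget a i d = lget a.toList i d := by
  simp only [aget, lget, Array.getElem?_toList]

lemma aset_toList {α : Type} (a : Array α) (i : Int) (v : α) :
    (aset a i v).toList = lset a.toList i v := Array.toList_setIfInBounds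

lemma stepA_corr (num : Int) (st : Array Bool × Array Int) (s : Int) :
    ((stepA num st s).1.toList, (stepA num st s).2.toList)
      = stepL num (st.1.toList, st.2.toList) s := by
  simp only [stepA, stepL, aget_eq]
  split
  · simp only [aset_toList]
  · rfl

lemma foldl_stepA_corr (num : Int) :
    ∀ (l : List Int) (st : Array Bool × Array Int),
    ((l.foldl (stepA num) st).1.toList, (l.foldl (stepA num) st).2.toList)
      = l.foldl (stepL num) (st.1.toList, st.2.toList) := by
  intro l
  induction l with
  | nil => intro st; rfl
  | cons s l ih =>
    intro st
    rw [List.foldl_cons, List.foldl_cons, ih (stepA num st s), stepA_corr]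

lemma passA_corr (target : Int) (st : Array Bool × Array Int) (num : Int) :
    ((passA target st num).1.toList, (passA target st num).2.toList)
      = passL target (st.1.toList, st.2.toList) num := by
  simp only [passA, passL]
  split
  · rfl
  · rw [foldl_stepA_corr]

lemma foldl_passA_corr (target : Int) :
    ∀ (nums : List Int) (st : Array Bool × Array Int),
    ((nums.foldl (passA target) st).1.toList, (nums.foldl (passA target) st).2.toList)
      = nums.foldl (passL target) (st.1.toList, st.2.toList) := by
  intro nums
  induction nums with
  | nil => intro st; rfl
  | cons num nums ih =>
    intro st
    rw [List.foldl_cons, List.foldl_cons, ih (passA target st num), passA_corr]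

lemma reconA_corr (prev : Array Int) :
    ∀ (fuel : Nat) (s : Int) (acc : List Int),
    reconA prev fuel s acc = reconL prev.toList fuel s acc := by
  intro fuel
  induction fuel with
  | zero => intro s acc; rfl
  | succ fuel ih =>
    intro s acc
    simp only [reconA, reconL, aget_eq]
    split
    · split
      · rfl
      · rw [ih]
    · rfl


-- total get/set agree with an if-then-else at nonnegative in-range indices
lemma getD_setD_int {α : Type} (xs : List α) (i j : Int) (v d : α)
    (hi0 : 0 ≤ i) (hi : i < (xs.length : Int)) (hj0 : 0 ≤ j) :
    lget (lset xs i v) j d =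
      if j = i then v else lget xs j d := by
  simp only [lget, lset, List.getElem?_set]
  by_cases h : j = i
  · rw [if_pos h, if_pos (by omega), if_pos (by omega)]
    rfl
  · rw [if_neg (by omega), if_neg h]

lemma getD_replicate {α : Type} (n : Nat) (a d : α) (j : Int) (h0 : 0 ≤ j) (h : j < (n : Int)) :
    lget (List.replicate n a) j d = a := by
  simp only [lget, List.getElem?_replicate]
  rw [if_pos (by omega)]
  rfl

lemma passL_loop_char (num : Int) (T : Int) (h0 : 0 ≤ num) :
    ∀ (k : Nat) (dp : List Bool) (prev : List Int),
    dp.length = (T + 1).toNat → prev.length = (T + 1).toNat → num - 1 + (k : Int) ≤ T →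
    (((PySem.List.pyRange (num - 1 + (k : Int)) (num - 1) (-1)).foldl (stepL num) (dp, prev)).1.length = dp.length ∧
     ((PySem.List.pyRange (num - 1 + (k : Int)) (num - 1) (-1)).foldl (stepL num) (dp, prev)).2.length = prev.length) ∧
    ∀ x : Int, 0 ≤ x → x ≤ T →
      (lget ((PySem.List.pyRange (num - 1 + (k : Int)) (num - 1) (-1)).foldl (stepL num) (dp, prev)).1 x false
        = (lget dp x false || (decide (num ≤ x ∧ x ≤ num - 1 + (k : Int)) && lget dp (x - num) false))) ∧
      (lget ((PySem.List.pyRange (num - 1 + (k : Int)) (num - 1) (-1)).foldl (stepL num) (dp, prev)).2 x 0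
        = if lget dp x false = false ∧ num ≤ x ∧ x ≤ num - 1 + (k : Int) ∧ lget dp (x - num) false = true
          then x - num else lget prev x 0) := by
  intro k
  induction k with
  | zero =>
    intro dp prev hdp hprev hbound
    rw [PySem.List.pyRange_neg_one_eq_nil (by omega)]
    refine ⟨⟨rfl, rfl⟩, ?_⟩
    intro x hx0 hxT
    constructor
    · have hd : decide (num ≤ x ∧ x ≤ num - 1 + ((0:Nat) : Int)) = false := by
        simp only [decide_eq_false_iff_not]; push_cast; omega
      rw [List.foldl_nil, hd]; simp
    · rw [List.foldl_nil, if_neg (by push_cast; omega)]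
  | succ k ih =>
    intro dp prev hdp hprev hbound
    have haval : num - 1 + ((k + 1 : Nat) : Int) = num + k := by push_cast; omega
    rw [haval, PySem.List.pyRange_neg_one_cons (by omega), List.foldl_cons]
    have hrange : num + (k : Int) - 1 = num - 1 + (k : Int) := by omega
    rw [hrange]
    have ha0 : (0:Int) ≤ num + k := by omega
    have haT : num + (k : Int) < ((T + 1).toNat : Int) := by omega
    by_cases hc : lget dp (num + (k:Int)) false = false ∧
                  lget dp (num + (k:Int) - num) false = true
    · -- step at s = num + k fires
      have hstep : stepL num (dp, prev) (num + (k:Int)) =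
          (lset dp (num + (k:Int)) true,
           lset prev (num + (k:Int)) (num + (k:Int) - num)) := by
        simp only [stepL]; rw [if_pos hc]
      rw [hstep]
      have hdp1 : (lset dp (num + (k:Int)) true).length = (T + 1).toNat := by
        rw [lset_length]; exact hdp
      have hprev1 : (lset prev (num + (k:Int)) (num + (k:Int) - num)).length = (T + 1).toNat := by
        rw [lset_length]; exact hprev
      obtain ⟨⟨hl1, hl2⟩, hchar⟩ := ih _ _ hdp1 hprev1 (by omega)
      refine ⟨⟨by rw [hl1, lset_length, hdp], by rw [hl2, lset_length, hprev]⟩, ?_⟩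
      intro x hx0 hxT
      obtain ⟨hcx1, hcx2⟩ := hchar x hx0 hxT
      have hgd : ∀ y : Int, 0 ≤ y →
          lget (lset dp (num + (k:Int)) true) y false
          = if y = num + (k:Int) then true else lget dp y false := fun y hy =>
        getD_setD_int dp _ y true false ha0 (by omega) hy
      have hgp : ∀ y : Int, 0 ≤ y →
          lget (lset prev (num + (k:Int)) (num + (k:Int) - num)) y 0
          = if y = num + (k:Int) then num + (k:Int) - num else lget prev y 0 := fun y hy =>
        getD_setD_int prev _ y _ 0 ha0 (by omega) hy
      by_cases hP1 : num ≤ x ∧ x ≤ num + (k:Int)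
      · by_cases hxa : x = num + (k:Int)
        · -- x is the freshly set index
          have hd1 : decide (num ≤ x ∧ x ≤ num - 1 + (k:Int)) = false := by
            simp only [decide_eq_false_iff_not]; omega
          have hd2 : decide (num ≤ x ∧ x ≤ num + (k:Int)) = true := by
            rw [decide_eq_true_eq]; exact hP1
          constructor
          · rw [hcx1, hd1, hgd x hx0, if_pos hxa, hd2]
            have hdx : lget dp x false = false := by rw [hxa]; exact hc.1
            have hdxn : lget dp (x - num) false = true := by rw [hxa]; exact hc.2
            simp [hdx, hdxn]
          · rw [hcx2, if_neg (by
                intro hcon; omega),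
              if_pos (by
                refine ⟨by rw [hxa]; exact hc.1, hP1.1, by omega, by rw [hxa]; exact hc.2⟩),
              hgp x hx0, if_pos hxa]
            omega
        · -- x < num + k, inside the already-characterised prefix
          have hxlt : x ≤ num - 1 + (k:Int) := by omega
          have hdpx : lget (lset dp (num + (k:Int)) true) x false
              = lget dp x false := by rw [hgd x hx0, if_neg hxa]
          have hdpxn : lget (lset dp (num + (k:Int)) true) (x - num) false
              = lget dp (x - num) false := by
            rw [hgd (x - num) (by omega), if_neg (by omega)]
          have hd1 : decide (num ≤ x ∧ x ≤ num - 1 + (k:Int)) = decide (num ≤ x ∧ x ≤ num + (k:Int)) := by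
            simp only [decide_eq_decide]; omega
          constructor
          · rw [hcx1, hdpx, hdpxn, hd1]
          · rw [hcx2]
            by_cases hf : lget dp x false = false ∧ lget dp (x - num) false = true
            · rw [if_pos ⟨by rw [hdpx]; exact hf.1, hP1.1, hxlt, by rw [hdpxn]; exact hf.2⟩,
                if_pos ⟨hf.1, hP1.1, hP1.2, hf.2⟩]
            · rw [if_neg (by
                  intro hcon
                  refine hf ⟨?_, ?_⟩
                  · have := hcon.1; rwa [hdpx] at this
                  · have := hcon.2.2.2; rwa [hdpxn] at this),
                if_neg (fun hcon => hf ⟨hcon.1, hcon.2.2.2⟩),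
                hgp x hx0, if_neg hxa]
      · -- x outside [num, num+k]: nothing changes at x
        have hxa : x ≠ num + (k:Int) := by omega
        have hd1 : decide (num ≤ x ∧ x ≤ num - 1 + (k:Int)) = false := by
          simp only [decide_eq_false_iff_not]; omega
        have hd2 : decide (num ≤ x ∧ x ≤ num + (k:Int)) = false := by
          simp only [decide_eq_false_iff_not]; omega
        constructor
        · rw [hcx1, hd1, hd2, hgd x hx0, if_neg hxa]; simp
        · rw [hcx2, if_neg (by intro hcon; exact hP1 ⟨hcon.2.1, by omega⟩),
            hgp x hx0, if_neg hxa, if_neg (fun hcon => hP1 ⟨hcon.2.1, hcon.2.2.1⟩)]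
    · -- step at s = num + k does not fire
      have hstep : stepL num (dp, prev) (num + (k:Int)) = (dp, prev) := by
        simp only [stepL]; rw [if_neg hc]
      rw [hstep]
      obtain ⟨⟨hl1, hl2⟩, hchar⟩ := ih dp prev hdp hprev (by omega)
      refine ⟨⟨hl1, hl2⟩, ?_⟩
      intro x hx0 hxT
      obtain ⟨hcx1, hcx2⟩ := hchar x hx0 hxT
      by_cases hxa : x = num + (k:Int)
      · have hd1 : decide (num ≤ x ∧ x ≤ num - 1 + (k:Int)) = false := by
          simp only [decide_eq_false_iff_not]; omega
        have hd2 : decide (num ≤ x ∧ x ≤ num + (k:Int)) = true := by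
          rw [decide_eq_true_eq]; omega
        constructor
        · rw [hcx1, hd1, hd2]
          rcases Decidable.not_and_iff_or_not.mp hc with h | h
          · have hdx : lget dp x false = true := by
              rw [hxa]; cases hval : lget dp (num + (k:Int)) false
              · exact absurd hval h
              · rfl
            simp [hdx]
          · have hdxn : lget dp (x - num) false = false := by
              rw [hxa]; cases hval : lget dp (num + (k:Int) - num) false
              · rfl
              · exact absurd hval h
            simp [hdxn]
        · rw [hcx2, if_neg (by intro hcon; omega),
            if_neg (by
              intro hcon
              exact hc ⟨by rw [← hxa]; exact hcon.1, by rw [← hxa]; exact hcon.2.2.2⟩)]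
      · have hd1 : decide (num ≤ x ∧ x ≤ num - 1 + (k:Int)) = decide (num ≤ x ∧ x ≤ num + (k:Int)) := by
          simp only [decide_eq_decide]; omega
        constructor
        · rw [hcx1, hd1]
        · rw [hcx2]
          by_cases hf : lget dp x false = false ∧ num ≤ x ∧ x ≤ num + (k:Int) ∧ lget dp (x - num) false = true
          · rw [if_pos ⟨hf.1, hf.2.1, by omega, hf.2.2.2⟩, if_pos hf]
          · rw [if_neg (fun hcon => hf ⟨hcon.1, hcon.2.1, by omega, hcon.2.2.2⟩), if_neg hf]

-- B's updates dict, characterised by get?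
lemma updB_fold_char (T num : Int) (reach : PySem.Dict Int (List Int)) :
    ∀ (l : List (Int × List Int)) (u0 : PySem.Dict Int (List Int)),
    (∀ p ∈ l, reach.get? p.1 = some p.2) → (l.map Prod.fst).Nodup →
    ∀ t : Int, (l.foldl (updB T num reach) u0).get? t =
      if (∃ p ∈ l, p.1 + num = t) ∧ t ≤ T ∧ reach.contains t = false
      then some (num :: reach.getD (t - num) []) else u0.get? t := by
  intro l
  induction l with
  | nil =>
    intro u0 _ _ t
    rw [List.foldl_nil, if_neg (by simp)]
  | cons p l ih =>
    intro u0 hl hnd t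
    rw [List.foldl_cons,
      ih _ (fun q hq => hl q (List.mem_cons_of_mem _ hq)) (by simpa using hnd.of_cons) t]
    by_cases h1 : (∃ q ∈ l, q.1 + num = t) ∧ t ≤ T ∧ reach.contains t = false
    · rw [if_pos h1, if_pos ⟨⟨h1.1.choose, List.mem_cons_of_mem _ h1.1.choose_spec.1,
        h1.1.choose_spec.2⟩, h1.2⟩]
    · rw [if_neg h1]
      by_cases h2 : p.1 + num = t ∧ t ≤ T ∧ reach.contains t = false
      · rw [if_pos ⟨⟨p, List.mem_cons_self, h2.1⟩, h2.2⟩]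
        have hcond : p.1 + num ≤ T ∧ reach.contains (p.1 + num) = false := by
          rw [h2.1]; exact h2.2
        simp only [updB]
        rw [if_pos hcond, PySem.Dict.get?_insert, if_pos h2.1.symm]
        have hp2 : reach.getD (t - num) [] = p.2 := by
          have : t - num = p.1 := by omega
          rw [this]
          exact PySem.Dict.getD_of_get?_eq_some reach [] (hl p List.mem_cons_self)
        rw [hp2]
      · rw [if_neg (by
          intro hcon
          rcases hcon with ⟨⟨q, hq, hqt⟩, hrest⟩
          rcases List.mem_cons.mp hq with rfl | hq'
          · exact h2 ⟨hqt, hrest⟩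
          · exact h1 ⟨⟨q, hq', hqt⟩, hrest⟩)]
        simp only [updB]
        split
        · rename_i hcond
          rw [PySem.Dict.get?_insert]
          rw [if_neg (by
            intro hteq
            exact h2 ⟨hteq.symm, by rw [hteq]; exact hcond⟩)]
        · rfl

lemma updB_fold_nodup (T num : Int) (reach : PySem.Dict Int (List Int)) :
    ∀ (l : List (Int × List Int)) (u0 : PySem.Dict Int (List Int)),
    u0.keys.Nodup → (l.foldl (updB T num reach) u0).keys.Nodup := by
  intro l
  induction l with
  | nil => intro u0 h; exact h
  | cons p l ih =>
    intro u0 h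
    refine ih _ ?_
    simp only [updB]
    split
    · exact PySem.Dict.nodup_keys_insert _ _ _ h
    · exact h

-- merging a dict into another by repeated insert, characterised by get?
lemma insert_fold_get? :
    ∀ (l : List (Int × List Int)) (r : PySem.Dict Int (List Int)) (t : Int),
    (l.map Prod.fst).Nodup →
    (l.foldl (fun r p => r.insert p.1 p.2) r).get? t =
      ((PySem.Dict.mk l).get? t).or (r.get? t) := by
  intro l
  induction l with
  | nil =>
    intro r t _
    simp [PySem.Dict.get?, List.foldl_nil]
  | cons p l ih =>
    intro r t hnd
    rw [List.foldl_cons, ih _ t (by simpa using hnd.of_cons)]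
    by_cases hpt : p.1 = t
    · have hnone : (PySem.Dict.mk l).get? t = none := by
        cases hval : (PySem.Dict.mk l).get? t with
        | none => rfl
        | some v =>
          have hmem := PySem.Dict.mem_items_of_get?_eq_some _ hval
          have : t ∈ l.map Prod.fst := List.mem_map.mpr ⟨(t, v), hmem, rfl⟩
          rw [← hpt] at this
          have hn := (List.nodup_cons.mp hnd).1
          exact absurd (by simpa using this) (by simpa using hn)
      rw [hnone, PySem.Dict.get?_mk_cons, if_pos (by simpa using hpt),
        PySem.Dict.get?_insert, if_pos hpt.symm]
      simp
    · rw [PySem.Dict.get?_mk_cons, if_neg (by simpa using hpt),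
        PySem.Dict.get?_insert, if_neg (fun h => hpt h.symm)]

lemma insert_fold_nodup :
    ∀ (l : List (Int × List Int)) (r : PySem.Dict Int (List Int)),
    r.keys.Nodup → (l.foldl (fun r p => r.insert p.1 p.2) r).keys.Nodup := by
  intro l
  induction l with
  | nil => intro r h; exact h
  | cons p l ih =>
    intro r h
    exact ih _ (PySem.Dict.nodup_keys_insert _ _ _ h)

-- one full pass of B, characterised by get?
lemma passB_char (T num : Int) (reach : PySem.Dict Int (List Int))
    (hnd : reach.keys.Nodup) (hle : num ≤ T) :
    ∀ t : Int, (passB T reach num).get? t =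
      if reach.contains (t - num) = true ∧ t ≤ T ∧ reach.contains t = false
      then some (num :: reach.getD (t - num) []) else reach.get? t := by
  intro t
  have hitems : (reach.items.map Prod.fst).Nodup := hnd
  have hl : ∀ p ∈ reach.items, reach.get? p.1 = some p.2 := by
    intro p hp
    exact PySem.Dict.get?_of_mem_items reach (by exact hp) hnd
  have hund : (reach.items.foldl (updB T num reach) PySem.Dict.empty).keys.Nodup := by
    refine updB_fold_nodup T num reach _ _ ?_
    simp [PySem.Dict.empty, PySem.Dict.keys]
  simp only [passB]
  rw [if_neg (by omega)]
  rw [insert_fold_get? _ reach t hund]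
  have heta : PySem.Dict.mk (reach.items.foldl (updB T num reach) PySem.Dict.empty).items
      = reach.items.foldl (updB T num reach) PySem.Dict.empty := rfl
  rw [heta, updB_fold_char T num reach reach.items PySem.Dict.empty hl hitems t]
  have hiff : (∃ p ∈ reach.items, p.1 + num = t) ↔ reach.contains (t - num) = true := by
    constructor
    · rintro ⟨p, hp, hpt⟩
      have : p.1 = t - num := by omega
      rw [← this, PySem.Dict.contains_eq_isSome_get?, hl p hp]
      rfl
    · intro hcont
      rw [PySem.Dict.contains_eq_isSome_get?] at hcont
      cases hval : reach.get? (t - num) with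
      | none => rw [hval] at hcont; exact absurd hcont (by simp)
      | some v =>
        exact ⟨(t - num, v), PySem.Dict.mem_items_of_get?_eq_some _ hval, by omega⟩
  by_cases hC : reach.contains (t - num) = true ∧ t ≤ T ∧ reach.contains t = false
  · rw [if_pos ⟨hiff.mpr hC.1, hC.2⟩, if_pos hC]
    rfl
  · rw [if_neg (fun hcon => hC ⟨hiff.mp hcon.1, hcon.2⟩), if_neg hC,
      PySem.Dict.get?_empty]
    rfl

lemma passB_get?_of_contains (T num : Int) (reach : PySem.Dict Int (List Int))
    (hnd : reach.keys.Nodup) (hle : num ≤ T) (t : Int) (hct : reach.contains t = true) :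
    (passB T reach num).get? t = reach.get? t := by
  rw [passB_char T num reach hnd hle t, if_neg (by intro h; rw [hct] at h; exact absurd h.2.2 (by simp))]

lemma passB_contains_mono (T num : Int) (reach : PySem.Dict Int (List Int))
    (hnd : reach.keys.Nodup) (hle : num ≤ T) (t : Int) (hct : reach.contains t = true) :
    (passB T reach num).contains t = true := by
  rw [PySem.Dict.contains_eq_isSome_get?, passB_get?_of_contains T num reach hnd hle t hct,
    ← PySem.Dict.contains_eq_isSome_get?, hct]

lemma passB_nodup (T num : Int) (reach : PySem.Dict Int (List Int))
    (hnd : reach.keys.Nodup) : (passB T reach num).keys.Nodup := by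
  simp only [passB]
  split
  · exact hnd
  · exact insert_fold_nodup _ _ hnd

-- the joint invariant tying A's (dp, prev) to B's reach
def DPInv (T : Int) (dp : List Bool) (prev : List Int) (reach : PySem.Dict Int (List Int)) : Prop :=
  dp.length = (T + 1).toNat ∧ prev.length = (T + 1).toNat ∧
  reach.keys.Nodup ∧
  (∀ k : Int, reach.contains k = true → 0 ≤ k ∧ k ≤ T) ∧
  reach.get? 0 = some [] ∧
  (∀ s : Int, 0 ≤ s → s ≤ T → lget dp s false = reach.contains s) ∧
  (∀ s : Int, 0 < s → s ≤ T → lget dp s false = true →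
    0 ≤ lget prev s 0 ∧ lget prev s 0 < s ∧
    reach.contains (lget prev s 0) = true ∧
    reach.get? s = some ((s - lget prev s 0) :: reach.getD (lget prev s 0) []))

lemma inv_init (T : Int) (hT : 1 ≤ T) :
    DPInv T (lset (List.replicate (T + 1).toNat false) 0 true)
          (List.replicate (T + 1).toNat (-1))
          (PySem.Dict.empty.insert 0 []) := by
  have hlen : ((List.replicate (T + 1).toNat (false : Bool)).length : Int) = T + 1 := by
    simp; omega
  have hcont : ∀ k : Int, (PySem.Dict.empty.insert 0 ([] : List Int)).contains k = (k == 0) := by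
    intro k
    rw [PySem.Dict.contains_insert]
    simp [PySem.Dict.contains_empty]
  refine ⟨by rw [lset_length]; simp, by simp, ?_, ?_, ?_, ?_, ?_⟩
  · exact PySem.Dict.nodup_keys_insert _ _ _ (by simp [PySem.Dict.empty, PySem.Dict.keys])
  · intro k hk
    rw [hcont k] at hk
    have : k = 0 := by simpa using hk
    omega
  · rw [PySem.Dict.get?_insert, if_pos rfl]
  · intro s hs0 hsT
    rw [getD_setD_int _ 0 s true false le_rfl (by omega) hs0, hcont s]
    by_cases hs : s = 0
    · rw [if_pos hs, hs]; simp
    · rw [if_neg hs, getD_replicate _ _ _ s hs0 (by omega)]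
      simp [hs]
  · intro s hs0 hsT hdp
    rw [getD_setD_int _ 0 s true false le_rfl (by omega) (by omega), if_neg (by omega),
      getD_replicate _ _ _ s (by omega) (by omega)] at hdp
    exact absurd hdp (by simp)

lemma inv_pass (T : Int) (num : Int) (h0 : 0 ≤ num)
    (dp : List Bool) (prev : List Int) (reach : PySem.Dict Int (List Int))
    (h : DPInv T dp prev reach) :
    DPInv T (passL T (dp, prev) num).1 (passL T (dp, prev) num).2 (passB T reach num) := by
  obtain ⟨hdp, hprev, hnd, hbounds, h0get, hdc, hclause⟩ := h
  have h0cont : reach.contains 0 = true := by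
    rw [PySem.Dict.contains_eq_isSome_get?, h0get]; rfl
  by_cases hgt : num > T
  · have hA : passL T (dp, prev) num = (dp, prev) := by
      simp only [passL]; rw [if_pos hgt]
    have hB : passB T reach num = reach := by
      simp only [passB]; rw [if_pos hgt]
    rw [hA, hB]
    exact ⟨hdp, hprev, hnd, hbounds, h0get, hdc, hclause⟩
  · have hle : num ≤ T := by omega
    have hA : passL T (dp, prev) num = (PySem.List.pyRange T (num - 1) (-1)).foldl (stepL num) (dp, prev) := by
      simp only [passL]; rw [if_neg hgt]
    have hk : num - 1 + (((T - num + 1).toNat : Nat) : Int) = T := by omega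
    obtain ⟨⟨hl1, hl2⟩, hchar⟩ := passL_loop_char num T h0 (T - num + 1).toNat dp prev hdp hprev (by omega)
    rw [hk] at hl1 hl2 hchar
    have hg := passB_char T num reach hnd hle
    have hmono := passB_contains_mono T num reach hnd hle
    have hpres := passB_get?_of_contains T num reach hnd hle
    have hcontneg : ∀ t : Int, t < 0 → reach.contains t = false := by
      intro t ht
      cases hv : reach.contains t
      · rfl
      · exact absurd (hbounds t hv).1 (by omega)
    rw [hA]
    refine ⟨by rw [hl1, hdp], by rw [hl2, hprev], passB_nodup T num reach hnd, ?_, ?_, ?_, ?_⟩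
    · -- bounds of new keys
      intro k hk'
      rw [PySem.Dict.contains_eq_isSome_get?, hg k] at hk'
      by_cases hcond : reach.contains (k - num) = true ∧ k ≤ T ∧ reach.contains k = false
      · have := (hbounds _ hcond.1).1
        exact ⟨by omega, hcond.2.1⟩
      · rw [if_neg hcond, ← PySem.Dict.contains_eq_isSome_get?] at hk'
        exact hbounds k hk'
    · -- 0 still maps to []
      rw [hpres 0 h0cont]; exact h0get
    · -- dp' s = contains' s
      intro s hs0 hsT
      rw [(hchar s hs0 hsT).1, PySem.Dict.contains_eq_isSome_get?, hg s]
      by_cases hcond : reach.contains (s - num) = true ∧ s ≤ T ∧ reach.contains s = false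
      · rw [if_pos hcond]
        have hsn0 : 0 ≤ s - num := (hbounds _ hcond.1).1
        have hdpsn : lget dp (s - num) false = true := by
          rw [hdc (s - num) hsn0 (by omega)]; exact hcond.1
        have hd2 : decide (num ≤ s ∧ s ≤ T) = true := by rw [decide_eq_true_eq]; omega
        simp [hdpsn, hd2]
      · rw [if_neg hcond, ← PySem.Dict.contains_eq_isSome_get?]
        cases hcs : reach.contains s
        · have hdps : lget dp s false = false := by rw [hdc s hs0 hsT, hcs]
          rw [hdps]
          by_cases hns : num ≤ s
          · have hcsn : reach.contains (s - num) = false := by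
              cases hv : reach.contains (s - num)
              · rfl
              · exact absurd ⟨hv, hsT, hcs⟩ hcond
            have : lget dp (s - num) false = false := by
              rw [hdc (s - num) (by omega) (by omega), hcsn]
            simp [this]
          · have : decide (num ≤ s ∧ s ≤ T) = false := by
              simp only [decide_eq_false_iff_not]; omega
            simp [this]
        · have hdps : lget dp s false = true := by rw [hdc s hs0 hsT, hcs]
          simp [hdps]
    · -- backpointer clause
      intro s hs0 hsT hdps'
      rw [(hchar s (by omega) hsT).1] at hdps'
      rw [(hchar s (by omega) hsT).2]
      by_cases hds : lget dp s false = true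
      · -- already reachable before this pass
        rw [if_neg (by intro hcon; rw [hds] at hcon; exact absurd hcon.1 (by simp))]
        obtain ⟨hp0, hps, hpcont, hpget⟩ := hclause s hs0 hsT hds
        have hcs : reach.contains s = true := by rw [← hdc s (by omega) hsT]; exact hds
        refine ⟨hp0, hps, hmono _ hpcont, ?_⟩
        rw [hpres s hcs, hpget, PySem.Dict.getD_eq_get?_getD, PySem.Dict.getD_eq_get?_getD,
          hpres _ hpcont]
      · -- newly reached in this pass via num
        have hds' : lget dp s false = false := by
          cases hv : lget dp s false
          · rfl
          · exact absurd hv hds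
        rw [hds'] at hdps'
        simp only [Bool.false_or, Bool.and_eq_true, decide_eq_true_eq] at hdps'
        obtain ⟨⟨hns, _⟩, hdsn⟩ := hdps'
        have hnum0 : num ≠ 0 := by
          intro hzero
          rw [hzero, sub_zero, hds'] at hdsn
          exact absurd hdsn (by simp)
        rw [if_pos ⟨hds', hns, hsT, hdsn⟩]
        have hsn0 : (0:Int) ≤ s - num := by omega
        have hcsn : reach.contains (s - num) = true := by
          rw [← hdc (s - num) hsn0 (by omega)]; exact hdsn
        have hcs : reach.contains s = false := by rw [← hdc s (by omega) hsT, hds']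
        refine ⟨by omega, by omega, hmono _ hcsn, ?_⟩
        rw [hg s, if_pos ⟨hcsn, hsT, hcs⟩]
        have : s - (s - num) = num := by ring
        rw [this, PySem.Dict.getD_eq_get?_getD, PySem.Dict.getD_eq_get?_getD, hpres _ hcsn]

lemma inv_fold (T : Int) :
    ∀ (nums : List Int), (∀ num ∈ nums, 0 ≤ num) →
    ∀ (dp : List Bool) (prev : List Int) (reach : PySem.Dict Int (List Int)),
    DPInv T dp prev reach →
    DPInv T (nums.foldl (passL T) (dp, prev)).1 (nums.foldl (passL T) (dp, prev)).2
          (nums.foldl (passB T) reach) := by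
  intro nums
  induction nums with
  | nil => intro _ dp prev reach h; exact h
  | cons num nums ih =>
    intro hnn dp prev reach h
    rw [List.foldl_cons, List.foldl_cons]
    have hstep := inv_pass T num (hnn num List.mem_cons_self) dp prev reach h
    exact ih (fun q hq => hnn q (List.mem_cons_of_mem _ hq))
      (passL T (dp, prev) num).1 (passL T (dp, prev) num).2 _ hstep

lemma recon_ok (T : Int) (dp : List Bool) (prev : List Int) (reach : PySem.Dict Int (List Int))
    (h : DPInv T dp prev reach) :
    ∀ (fuel : Nat) (s : Int) (acc : List Int), 0 ≤ s → s ≤ T → s.toNat < fuel →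
    lget dp s false = true →
    reconL prev fuel s acc = acc ++ reach.getD s [] := by
  obtain ⟨hdp, hprev, hnd, hbounds, h0get, hdc, hclause⟩ := h
  intro fuel
  induction fuel with
  | zero => intro s acc _ _ hf; omega
  | succ fuel ih =>
    intro s acc hs0 hsT hf hdps
    by_cases hs : 0 < s
    · obtain ⟨hp0, hps, hpcont, hpget⟩ := hclause s hs hsT hdps
      simp only [reconL]
      rw [if_pos hs, if_neg (by omega)]
      have hdpp : lget dp (lget prev s 0) false = true := by
        rw [hdc _ hp0 (by omega)]; exact hpcont
      rw [ih (lget prev s 0) (acc ++ [s - lget prev s 0]) hp0 (by omega)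
        (by omega) hdpp]
      rw [show reach.getD s [] = (reach.get? s).getD [] from PySem.Dict.getD_eq_get?_getD _ _ _, hpget]
      simp
    · have hs0' : s = 0 := by omega
      simp only [reconL]
      rw [if_neg hs, hs0', PySem.Dict.getD_eq_get?_getD, h0get]
      simp

-- ===== VERDICT (by name: the statement is the Claim_ definition above) =====
theorem solve_subset_sum_exact_py_spec : Claim_equal_solve_subset_sum_exact_py := by
  unfold Claim_equal_solve_subset_sum_exact_py
  intro numbers target _ hpre
  unfold Spec_solve_subset_sum_exact_py
  simp only [solve_subset_sum_exact_py, solve_subset_sum_exact_py_alt]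
  by_cases ht0 : target = 0
  · rw [if_pos ht0, if_pos ht0]
  rw [if_neg ht0, if_neg ht0]
  by_cases h1 : numbers.length = 0 ∨ target < 0
  · rw [if_pos h1, if_pos h1]
  rw [if_neg h1, if_neg h1]
  by_cases h2 : target > 100000
  · rw [if_pos h2, if_pos h2]
  rw [if_neg h2, if_neg h2]
  rw [aget_eq, reconA_corr]
  have hbr := foldl_passA_corr target numbers
    (aset (Array.replicate (target + 1).toNat false) 0 true, Array.replicate (target + 1).toNat (-1))
  simp only [aset_toList, Array.toList_replicate] at hbr
  have hb1 := congrArg Prod.fst hbr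
  have hb2 := congrArg Prod.snd hbr
  dsimp only at hb1 hb2
  rw [hb1, hb2]
  have hT1 : 1 ≤ target := by omega
  have hne : numbers ≠ [] := by
    intro hcon; exact h1 (Or.inl (by rw [hcon]; rfl))
  have hnn : ∀ num ∈ numbers, 0 ≤ num := by
    rcases hpre with hp | hp | hp | hp
    · omega
    · omega
    · exact absurd hp hne
    · exact hp
  have hinv := inv_fold target numbers hnn
    (lset (List.replicate (target + 1).toNat false) 0 true)
    (List.replicate (target + 1).toNat (-1))
    (PySem.Dict.empty.insert 0 [])
    (inv_init target hT1)
  obtain ⟨hdp, hprev, hnd, hbounds, h0get, hdc, hclause⟩ := hinv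
  have hdcT := hdc target (by omega) le_rfl
  by_cases hdone : lget (numbers.foldl (passL target)
      (lset (List.replicate (target + 1).toNat false) 0 true,
       List.replicate (target + 1).toNat (-1))).1 target false = false
  · rw [if_pos hdone]
    rw [hdone] at hdcT
    cases hval : (numbers.foldl (passB target) (PySem.Dict.empty.insert 0 [])).get? target with
    | none => rfl
    | some v =>
      have : (numbers.foldl (passB target) (PySem.Dict.empty.insert 0 [])).contains target = true := by
        rw [PySem.Dict.contains_eq_isSome_get?, hval]; rfl
      rw [this] at hdcT
      exact absurd hdcT (by simp)
  · rw [if_neg hdone]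
    have hdpT : lget (numbers.foldl (passL target)
        (lset (List.replicate (target + 1).toNat false) 0 true,
         List.replicate (target + 1).toNat (-1))).1 target false = true := by
      cases hv : lget (numbers.foldl (passL target)
        (lset (List.replicate (target + 1).toNat false) 0 true,
         List.replicate (target + 1).toNat (-1))).1 target false
      · exact absurd hv hdone
      · rfl
    have hrec := recon_ok target _ _ _
      ⟨hdp, hprev, hnd, hbounds, h0get, hdc, hclause⟩
      (target + 1).toNat target [] (by omega) le_rfl (by omega) hdpT
    rw [hrec]
    rw [hdpT] at hdcT
    cases hval : (numbers.foldl (passB target) (PySem.Dict.empty.insert 0 [])).get? target with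
    | none =>
      have : (numbers.foldl (passB target) (PySem.Dict.empty.insert 0 [])).contains target = false := by
        rw [PySem.Dict.contains_eq_isSome_get?, hval]; rfl
      rw [this] at hdcT
      exact absurd hdcT.symm (by simp)
    | some v =>
      rw [show (numbers.foldl (passB target) (PySem.Dict.empty.insert 0 [])).getD target [] = v
        from PySem.Dict.getD_of_get?_eq_some _ [] hval]
      simp
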